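-- pv_equiv track=rewrite | github.com/stbishop04/nu | stat210.py | countStreaks
-- ===== SOURCE A (Python) =====
-- def countStreaks(seq):
--     count1 = 0
--     count0 = 0
--     counts = []
--     for i in range(len(seq)):
--         if i <= 2:
--             pass
--         elif seq[i-3] == seq[i-2] == seq[i-1] == seq[i] == 1:
--             count1 = count1 + 1
--         elif seq[i-3] == seq[i-2] == seq[i-1] == 1 and seq[i] == 0:
--             count0 = count0 + 1
--     counts.append(count0)
--     counts.append(count1)
--     return counts
-- ===== SOURCE B (Python) =====
-- def countStreaks(seq):
--     count0 = 0
--     count1 = 0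
--     run = 0
--     for x in seq:
--         if x == 1:
--             run += 1
--             if run >= 4:
--                 count1 += 1
--         else:
--             if x == 0 and run >= 3:
--                 count0 += 1
--             run = 0
--     return [count0, count1]
-- ===== Notes on version B (the rewrite author's own statement) =====
-- stated objective: faster
-- what changed: B maintains a running length of the current streak of 1s instead of re-reading a 4-element backward window at every index, so it never indexes the sequence (measured ~2.8x constant-factor speedup).
import Mathlib
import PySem

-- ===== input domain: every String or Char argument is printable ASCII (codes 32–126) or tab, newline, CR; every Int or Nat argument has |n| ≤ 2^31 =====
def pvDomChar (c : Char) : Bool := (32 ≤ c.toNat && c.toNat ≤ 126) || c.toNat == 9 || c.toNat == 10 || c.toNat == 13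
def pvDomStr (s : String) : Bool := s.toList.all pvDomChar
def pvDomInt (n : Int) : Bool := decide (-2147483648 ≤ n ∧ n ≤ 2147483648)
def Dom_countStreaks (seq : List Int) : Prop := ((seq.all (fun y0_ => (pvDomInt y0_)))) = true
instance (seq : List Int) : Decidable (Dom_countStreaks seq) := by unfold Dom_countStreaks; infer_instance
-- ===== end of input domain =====

-- B keeps a running length of the current streak of 1s instead of re-reading a 4-element
-- backward window at every index (alternative decomposition, same O(n) cost).

-- ===== PORT A =====
-- seq[i-3] … seq[i] ported as pyGetD _ _ 0: exact here, since the branch only runs for 3 ≤ i < len(seq),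
-- so every read is in range.  The Python chained comparison a==b==c==d==1 is kept as the conjunction of
-- the pairwise equalities, in order.
def countStreaks (seq : List Int) : List Int :=
  let st := (PySem.List.pyRange 0 (seq.length : Int) 1).foldl
    (fun (st : Int × Int) i =>
      if i ≤ 2 then st
      else if PySem.List.pyGetD seq (i-3) 0 = PySem.List.pyGetD seq (i-2) 0
            ∧ PySem.List.pyGetD seq (i-2) 0 = PySem.List.pyGetD seq (i-1) 0
            ∧ PySem.List.pyGetD seq (i-1) 0 = PySem.List.pyGetD seq i 0
            ∧ PySem.List.pyGetD seq i 0 = 1 then (st.1 + 1, st.2)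
      else if PySem.List.pyGetD seq (i-3) 0 = PySem.List.pyGetD seq (i-2) 0
            ∧ PySem.List.pyGetD seq (i-2) 0 = PySem.List.pyGetD seq (i-1) 0
            ∧ PySem.List.pyGetD seq (i-1) 0 = 1
            ∧ PySem.List.pyGetD seq i 0 = 0 then (st.1, st.2 + 1)
      else st) ((0 : Int), (0 : Int))
  [st.2, st.1]

-- ===== PORT B =====
-- state is (run, count0, count1)
def countStreaks_alt (seq : List Int) : List Int :=
  let st := seq.foldl
    (fun (st : Int × Int × Int) x =>
      if x = 1 then
        (st.1 + 1, st.2.1, if st.1 + 1 ≥ 4 then st.2.2 + 1 else st.2.2)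
      else
        (0, (if x = 0 ∧ st.1 ≥ 3 then st.2.1 + 1 else st.2.1), st.2.2))
    ((0 : Int), (0 : Int), (0 : Int))
  [st.2.1, st.2.2]

-- ===== PRECONDITION & SPEC =====
def Spec_countStreaks (seq : List Int) (out : List Int) : Prop := out = countStreaks_alt seq
instance (seq : List Int) (out : List Int) : Decidable (Spec_countStreaks seq out) := by unfold Spec_countStreaks; infer_instance

-- ===== CLAIM (what is proved, stated in full; the proofs are below) =====
def Claim_equal_countStreaks : Prop := ∀ (seq : List Int), Dom_countStreaks seq → Spec_countStreaks seq (countStreaks seq)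

-- ===== LEMMAS AND PROOFS =====

-- proof-side names for the two loop bodies (definitionally the lambdas in the ports)
def fA (seq : List Int) (st : Int × Int) (i : Int) : Int × Int :=
  if i ≤ 2 then st
  else if PySem.List.pyGetD seq (i-3) 0 = PySem.List.pyGetD seq (i-2) 0
        ∧ PySem.List.pyGetD seq (i-2) 0 = PySem.List.pyGetD seq (i-1) 0
        ∧ PySem.List.pyGetD seq (i-1) 0 = PySem.List.pyGetD seq i 0
        ∧ PySem.List.pyGetD seq i 0 = 1 then (st.1 + 1, st.2)
  else if PySem.List.pyGetD seq (i-3) 0 = PySem.List.pyGetD seq (i-2) 0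
        ∧ PySem.List.pyGetD seq (i-2) 0 = PySem.List.pyGetD seq (i-1) 0
        ∧ PySem.List.pyGetD seq (i-1) 0 = 1
        ∧ PySem.List.pyGetD seq i 0 = 0 then (st.1, st.2 + 1)
  else st

def fB (st : Int × Int × Int) (x : Int) : Int × Int × Int :=
  if x = 1 then
    (st.1 + 1, st.2.1, if st.1 + 1 ≥ 4 then st.2.2 + 1 else st.2.2)
  else
    (0, (if x = 0 ∧ st.1 ≥ 3 then st.2.1 + 1 else st.2.1), st.2.2)

-- length of the maximal all-1 suffix, written with B's own update rule
def trailOnes (l : List Int) : Int := l.foldl (fun r x => if x = 1 then r + 1 else 0) 0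

theorem trailOnes_aux_nonneg (l : List Int) (r : Int) (h : 0 ≤ r) :
    0 ≤ l.foldl (fun r x => if x = 1 then r + 1 else 0) r := by
  induction l generalizing r with
  | nil => exact h
  | cons x t ih => simp only [List.foldl_cons]; split <;> [exact ih _ (by omega); exact ih _ le_rfl]

theorem trailOnes_aux_le (l : List Int) (r : Int) (h : 0 ≤ r) :
    l.foldl (fun r x => if x = 1 then r + 1 else 0) r ≤ r + l.length := by
  induction l generalizing r with
  | nil => simp
  | cons x t ih =>
      simp only [List.foldl_cons, List.length_cons]
      split
      · have := ih (r + 1) (by omega); push_cast at *; omega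
      · have := ih 0 le_rfl; push_cast at *; omega

theorem trailOnes_nonneg (l : List Int) : 0 ≤ trailOnes l := trailOnes_aux_nonneg l 0 le_rfl

theorem trailOnes_le_length (l : List Int) : trailOnes l ≤ l.length := by
  have := trailOnes_aux_le l 0 le_rfl; simpa using this

theorem trailOnes_append_singleton (l : List Int) (x : Int) :
    trailOnes (l ++ [x]) = if x = 1 then trailOnes l + 1 else 0 := by
  simp [trailOnes, List.foldl_append]

theorem trailOnes_ge_three (l' : List Int) (a b c : Int) :
    3 ≤ trailOnes (l' ++ [a, b, c]) ↔ (a = 1 ∧ b = 1 ∧ c = 1) := by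
  have h0 := trailOnes_nonneg l'
  show 3 ≤ (l' ++ [a, b, c]).foldl _ 0 ↔ _
  rw [List.foldl_append]
  show 3 ≤ [a,b,c].foldl _ (trailOnes l') ↔ _
  simp only [List.foldl_cons, List.foldl_nil]
  split_ifs <;> omega

theorem exists_last_three (l : List Int) (h : 3 ≤ l.length) :
    ∃ l' a b c, l = l' ++ [a, b, c] := by
  rcases hr : l.reverse with _ | ⟨c, t⟩
  · simp_all
  · rcases t with _ | ⟨b, t⟩
    · have := congrArg List.length hr; simp at this; omega
    · rcases t with _ | ⟨a, t⟩
      · have := congrArg List.length hr; simp at this; omega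
      · refine ⟨t.reverse, a, b, c, ?_⟩
        have : l = (c :: b :: a :: t).reverse := by rw [← hr, List.reverse_reverse]
        simpa using this

-- the per-step correspondence: one A-step at index |pre| equals one B-step on x,
-- and B's run component stays equal to trailOnes of the consumed prefix
theorem step_corr (pre rest : List Int) (x : Int) (st : Int × Int) :
    fB (trailOnes pre, st.2, st.1) x
      = (trailOnes (pre ++ [x]),
         (fA (pre ++ x :: rest) st (pre.length : Int)).2,
         (fA (pre ++ x :: rest) st (pre.length : Int)).1) := by
  obtain ⟨c1, c0⟩ := st
  have hnn := trailOnes_nonneg pre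
  have hle := trailOnes_le_length pre
  by_cases hlen : pre.length ≤ 2
  · -- A passes (i ≤ 2); B cannot reach run ≥ 3
    have hi : ((pre.length : Int)) ≤ 2 := by exact_mod_cast hlen
    rw [fA, if_pos hi]
    rw [fB, trailOnes_append_singleton]
    split
    · have : ¬ (trailOnes pre + 1 ≥ 4) := by
        have : (pre.length : Int) ≤ 2 := hi; omega
      simp_all
    · have : ¬ (x = 0 ∧ trailOnes pre ≥ 3) := by
        rintro ⟨_, h3⟩; have : (pre.length : Int) ≤ 2 := hi; omega
      simp_all
  · -- i ≥ 3: decompose pre and read the window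
    obtain ⟨l', a, b, c, rfl⟩ := exists_last_three pre (by omega)
    have hL : (((l' ++ [a,b,c]).length : Nat) : Int) = (l'.length : Int) + 3 := by
      simp
    have seq_eq : (l' ++ [a,b,c]) ++ x :: rest = l' ++ (a :: b :: c :: x :: rest) := by simp
    -- the four reads
    have hget : ∀ (k : Nat) (v : Int), (a :: b :: c :: x :: rest)[k]? = some v →
        PySem.List.pyGetD ((l' ++ [a,b,c]) ++ x :: rest) ((l'.length : Int) + k) 0 = v := by
      intro k v hk
      have : ((l'.length : Int) + k) = ((l'.length + k : Nat) : Int) := by push_cast; ring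
      rw [this, PySem.List.pyGetD_natCast, seq_eq, List.getD]
      rw [List.getElem?_append_right (by omega)]
      simpa [Nat.add_sub_cancel_left] using congrArg (fun o => o.getD 0) hk
    have h3 : PySem.List.pyGetD ((l' ++ [a,b,c]) ++ x :: rest) (((l' ++ [a,b,c]).length : Int) - 3) 0 = a := by
      have := hget 0 a rfl; rw [hL]; simp only [Nat.cast_zero, add_zero, add_sub_cancel_right] at this ⊢; exact this
    have h2 : PySem.List.pyGetD ((l' ++ [a,b,c]) ++ x :: rest) (((l' ++ [a,b,c]).length : Int) - 2) 0 = b := by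
      have := hget 1 b rfl; rw [hL]
      have e : (l'.length : Int) + 3 - 2 = (l'.length : Int) + 1 := by ring
      rw [e]; simpa using this
    have h1 : PySem.List.pyGetD ((l' ++ [a,b,c]) ++ x :: rest) (((l' ++ [a,b,c]).length : Int) - 1) 0 = c := by
      have := hget 2 c rfl; rw [hL]
      have e : (l'.length : Int) + 3 - 1 = (l'.length : Int) + 2 := by ring
      rw [e]; simpa using this
    have h0 : PySem.List.pyGetD ((l' ++ [a,b,c]) ++ x :: rest) (((l' ++ [a,b,c]).length : Int)) 0 = x := by
      have := hget 3 x rfl; rw [hL]; simpa using this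
    have hi : ¬ (((((l' ++ [a,b,c]).length : Nat)) : Int) ≤ 2) := by rw [hL]; omega
    have hrun := trailOnes_ge_three l' a b c
    rw [fA, if_neg hi, h3, h2, h1, h0, fB, trailOnes_append_singleton]
    split_ifs <;> simp_all <;> omega

-- the main loop correspondence
theorem main_corr (rest : List Int) : ∀ (pre : List Int) (st : Int × Int),
    (PySem.List.pyRange (pre.length : Int) (((pre ++ rest).length : Nat) : Int) 1).foldl
        (fA (pre ++ rest)) st
      = ((rest.foldl fB (trailOnes pre, st.2, st.1)).2.2,
         (rest.foldl fB (trailOnes pre, st.2, st.1)).2.1) := by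
  induction rest with
  | nil =>
      intro pre st
      rw [PySem.List.pyRange_one_eq_nil (by simp)]
      simp
  | cons x rest ih =>
      intro pre st
      have hlt : (pre.length : Int) < (((pre ++ x :: rest).length : Nat) : Int) := by
        simp
      have hs := step_corr pre rest x st
      rw [PySem.List.pyRange_one_cons hlt, List.foldl_cons, List.foldl_cons, hs]
      have hre : pre ++ x :: rest = (pre ++ [x]) ++ rest := by simp
      have hlen1 : (pre.length : Int) + 1 = (((pre ++ [x]).length : Nat) : Int) := by
        simp
      rw [hre, hlen1]
      have := ih (pre ++ [x]) (fA ((pre ++ [x]) ++ rest) st (pre.length : Int))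
      rw [this]

-- ===== VERDICT (by name: the statement is the Claim_ definition above) =====
theorem countStreaks_spec : Claim_equal_countStreaks := by
  intro seq _
  unfold Spec_countStreaks countStreaks countStreaks_alt
  have h := main_corr seq [] (0, 0)
  simp only [List.nil_append, List.length_nil, Nat.cast_zero] at h
  show [((PySem.List.pyRange 0 (seq.length : Int) 1).foldl (fA seq) (0, 0)).2,
        ((PySem.List.pyRange 0 (seq.length : Int) 1).foldl (fA seq) (0, 0)).1]
     = [(seq.foldl fB (0, 0, 0)).2.1, (seq.foldl fB (0, 0, 0)).2.2]
  rw [h]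
  rfl
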